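-- pv_equiv track=rewrite | github.com/saivoru777-ship-it/microns-explorer | scripts/13_truncation_diagnostic.py | decompose_branches_from_swc
-- ===== SOURCE A (Python) =====
-- from collections import defaultdict
--
-- def decompose_branches_from_swc(nodes):
--     """Decompose SWC nodes into branches as lists of node IDs.
--
--     A branch starts at the root or at a bifurcation point and ends at a
--     leaf or the node before the next bifurcation.
--     Returns list of lists of node IDs (each list = one branch).
--     """
--     children = defaultdict(list)
--     root = None
--     for nid, (x, y, z, parent) in nodes.items():
--         if parent == -1:
--             root = nid
--         else:
--             children[parent].append(nid)
--
--     if root is None: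
--         return []
--
--     branches = []
--     # DFS: accumulate current branch, split at bifurcations
--     stack = [(root, [root])]
--     while stack:
--         nid, current_branch = stack.pop()
--         kids = children[nid]
--         if len(kids) == 0:
--             # Leaf: close branch
--             branches.append(current_branch)
--         elif len(kids) == 1:
--             # Continuation: extend branch
--             stack.append((kids[0], current_branch + [kids[0]]))
--         else:
--             # Bifurcation: close branch, start new ones
--             branches.append(current_branch)
--             for kid in kids:
--                 stack.append((kid, [kid]))
--
--     return branches
-- ===== SOURCE B (Python) =====
-- def decompose_branches_from_swc(nodes):
--     """Decompose SWC nodes into branches (lists of node IDs).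
--
--     Instead of a stack of (node, partial-branch) pairs popped once per node,
--     keep a stack of branch START nodes only and walk each unary chain with an
--     inner loop; a bifurcation's kids become new starts (LIFO order matches A).
--     """
--     children = {}
--     root = None
--     for nid, (x, y, z, parent) in nodes.items():
--         if parent == -1:
--             root = nid
--         else:
--             children.setdefault(parent, []).append(nid)
--     if root is None:
--         return []
--     branches = []
--     starts = [root]
--     while starts:
--         nid = starts.pop()
--         branch = [nid]
--         kids = children.get(nid, [])
--         while len(kids) == 1:
--             nid = kids[0]
--             branch.append(nid)
--             kids = children.get(nid, [])
--         branches.append(branch)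
--         starts.extend(kids)   # empty at a leaf
--     return branches
-- ===== Notes on version B (the rewrite author's own statement) =====
-- stated objective: alternative
-- what changed: A runs a DFS with a stack of (node, partial-branch) pairs popped once per node; B keeps a stack of branch-start nodes only and walks each unary chain to its end with an inner loop, pushing a bifurcation's kids as new starts.
import Mathlib
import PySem

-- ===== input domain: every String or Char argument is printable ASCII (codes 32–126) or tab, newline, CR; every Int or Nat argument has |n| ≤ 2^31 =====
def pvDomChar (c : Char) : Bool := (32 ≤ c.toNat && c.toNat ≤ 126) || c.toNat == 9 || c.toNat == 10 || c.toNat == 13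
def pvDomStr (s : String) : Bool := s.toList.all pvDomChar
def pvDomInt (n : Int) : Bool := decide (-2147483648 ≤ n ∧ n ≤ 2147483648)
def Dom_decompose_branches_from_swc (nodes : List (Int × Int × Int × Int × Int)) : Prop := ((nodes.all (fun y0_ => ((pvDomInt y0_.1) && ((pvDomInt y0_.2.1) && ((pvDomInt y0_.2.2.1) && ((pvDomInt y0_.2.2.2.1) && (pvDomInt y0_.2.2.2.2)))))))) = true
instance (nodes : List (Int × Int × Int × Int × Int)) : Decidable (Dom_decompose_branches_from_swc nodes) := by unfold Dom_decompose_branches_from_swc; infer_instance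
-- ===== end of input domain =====

-- B differs from A in decomposition only (stack of branch starts + inner chain walk
-- vs stack of (node, partial branch)); same output, same asymptotic cost.

-- ===== PORT A =====
-- the dict parameter 'nodes' arrives as an association list; dict(pairs) semantics:
def pvNodesDict (nodes : List (Int × Int × Int × Int × Int)) : PySem.Dict Int (Int × Int × Int × Int) :=
  PySem.Dict.ofList (nodes.map (fun t => (t.1, (t.2.1, t.2.2.1, t.2.2.2.1, t.2.2.2.2))))

-- A's while loop; the Nat argument is fuel, a pure totality guard: each node is
-- popped at most once, so fuel len(nodes)+1 is never exhausted on a real run.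
def pvLoopA (c : PySem.Dict Int (List Int)) : Nat → List (Int × List Int) → List (List Int)
  | _, [] => []
  | 0, _ :: _ => []
  | f + 1, (nid, br) :: s =>
    match c.getD nid [] with
    | [] => br :: pvLoopA c f s                                   -- leaf: close branch
    | [k] => pvLoopA c f ((k, br ++ [k]) :: s)                    -- continuation
    | kids => br :: pvLoopA c f (kids.reverse.map (fun k => (k, [k])) ++ s)  -- bifurcation

def decompose_branches_from_swc (nodes : List (Int × Int × Int × Int × Int)) : List (List Int) :=
  let d := pvNodesDict nodes
  let st := d.items.foldl
    (fun (st : PySem.Dict Int (List Int) × Option Int) p =>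
      if p.2.2.2.2 == -1 then (st.1, some p.1)
      else (st.1.modify p.2.2.2.2 [] (fun l => l ++ [p.1]), st.2))
    (PySem.Dict.empty, none)
  match st.2 with
  | none => []
  | some root => pvLoopA st.1 (nodes.length + 1) [(root, [root])]

-- ===== PORT B =====
-- inner 'while len(kids) == 1' chain walk; fuel (totality guard) is threaded:
-- none = exhausted (never happens on a real run), else (finished branch, kids, fuel left)
def pvChase (c : PySem.Dict Int (List Int)) : Nat → Int → List Int → Option (List Int × List Int × Nat)
  | 0, _, _ => none
  | f + 1, nid, br =>
    match c.getD nid [] with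
    | [k] => pvChase c f k (br ++ [k])
    | kids => some (br, kids, f)

theorem pvChase_fuel_lt (c : PySem.Dict Int (List Int)) :
    ∀ (f : Nat) (n : Int) (br br' kids : List Int) (f' : Nat),
      pvChase c f n br = some (br', kids, f') → f' < f := by
  intro f
  induction f with
  | zero => intro n br br' kids f' h; simp [pvChase] at h
  | succ f ih =>
    intro n br br' kids f' h
    simp only [pvChase] at h
    match hk : c.getD n [] with
    | [k] => rw [hk] at h; exact Nat.lt_trans (ih _ _ _ _ _ h) (Nat.lt_succ_self f)
    | [] => rw [hk] at h; simp at h; omega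
    | a :: b :: t => rw [hk] at h; simp at h; omega

-- outer loop over the stack of branch starts
def pvOuterB (c : PySem.Dict Int (List Int)) : Nat → List Int → List (List Int)
  | _, [] => []
  | f, nid :: starts =>
    match h : pvChase c f nid [nid] with
    | none => []
    | some (br, kids, f') => br :: pvOuterB c f' (kids.reverse ++ starts)
termination_by f _ => f
decreasing_by exact pvChase_fuel_lt c _ _ _ _ _ _ h

def decompose_branches_from_swc_alt (nodes : List (Int × Int × Int × Int × Int)) : List (List Int) :=
  let d := pvNodesDict nodes
  let root := d.items.foldl (fun r p => if p.2.2.2.2 == -1 then some p.1 else r) (none : Option Int)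
  match root with
  | none => []
  | some r =>
    let children := d.items.foldl
      (fun (c : PySem.Dict Int (List Int)) p =>
        if p.2.2.2.2 == -1 then c else c.modify p.2.2.2.2 [] (fun l => l ++ [p.1]))
      PySem.Dict.empty
    pvOuterB children (nodes.length + 1) [r]

-- ===== PRECONDITION & SPEC =====
def Spec_decompose_branches_from_swc (nodes : List (Int × Int × Int × Int × Int)) (out : List (List Int)) : Prop := out = decompose_branches_from_swc_alt nodes
instance (nodes : List (Int × Int × Int × Int × Int)) (out : List (List Int)) : Decidable (Spec_decompose_branches_from_swc nodes out) := by unfold Spec_decompose_branches_from_swc; infer_instance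

-- ===== CLAIM (what is proved, stated in full; the proofs are below) =====
def Claim_equal_decompose_branches_from_swc : Prop := ∀ (nodes : List (Int × Int × Int × Int × Int)), Dom_decompose_branches_from_swc nodes → Spec_decompose_branches_from_swc nodes (decompose_branches_from_swc nodes)

-- ===== LEMMAS AND PROOFS =====

theorem pvLoopA_nil (c : PySem.Dict Int (List Int)) (f : Nat) : pvLoopA c f [] = [] := by
  cases f <;> rfl

-- A's stack loop computes what B's chain walk + start stack compute (any fuel).
theorem pvMain (c : PySem.Dict Int (List Int)) :
    ∀ (f : Nat) (n : Int) (br : List Int) (starts : List Int),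
      pvLoopA c f ((n, br) :: starts.map (fun k => (k, [k]))) =
        (match pvChase c f n br with
         | none => []
         | some (br', kids, f') => br' :: pvOuterB c f' (kids.reverse ++ starts)) := by
  intro f
  induction f with
  | zero => intro n br starts; simp [pvLoopA, pvChase]
  | succ f ih =>
    intro n br starts
    have houter : ∀ (l : List Int), pvOuterB c f l = pvLoopA c f (l.map (fun k => (k, [k]))) := by
      intro l
      cases l with
      | nil => simp [pvOuterB, pvLoopA_nil]
      | cons m l' =>
        rw [List.map_cons, ih m [m] l']
        cases hc : pvChase c f m [m] <;> (simp only [pvOuterB]; split <;> simp_all) <;> (subst hc; simp)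
    match hk : c.getD n [] with
    | [] =>
      simp only [pvLoopA, pvChase, hk, List.reverse_nil, List.nil_append]
      rw [houter starts]
    | [k] =>
      simp only [pvLoopA, pvChase, hk]
      exact ih k (br ++ [k]) starts
    | a :: b :: t =>
      simp only [pvLoopA, pvChase, hk]
      rw [houter, List.map_append]

theorem pvOuter_eq (c : PySem.Dict Int (List Int)) (f : Nat) (l : List Int) :
    pvOuterB c f l = pvLoopA c f (l.map (fun k => (k, [k]))) := by
  cases l with
  | nil => simp [pvOuterB, pvLoopA_nil]
  | cons m l' =>
    rw [List.map_cons, pvMain c f m [m] l']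
    cases hc : pvChase c f m [m] <;> (simp only [pvOuterB]; split <;> simp_all) <;> (subst hc; simp)

-- A's one fold over a pair of accumulators splits into B's two independent folds
theorem pvBuild_split (l : List (Int × (Int × Int × Int × Int))) :
    ∀ (cr : PySem.Dict Int (List Int) × Option Int),
      l.foldl
        (fun (st : PySem.Dict Int (List Int) × Option Int) p =>
          if p.2.2.2.2 == -1 then (st.1, some p.1)
          else (st.1.modify p.2.2.2.2 [] (fun l => l ++ [p.1]), st.2)) cr =
      (l.foldl (fun c p => if p.2.2.2.2 == -1 then c else c.modify p.2.2.2.2 [] (fun l => l ++ [p.1])) cr.1,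
       l.foldl (fun r p => if p.2.2.2.2 == -1 then some p.1 else r) cr.2) := by
  induction l with
  | nil => intro cr; rfl
  | cons p t ih =>
    intro cr
    simp only [List.foldl_cons]
    rw [ih]
    by_cases h : p.2.2.2.2 == -1 <;> simp [h]

-- ===== VERDICT (by name: the statement is the Claim_ definition above) =====
theorem decompose_branches_from_swc_spec : Claim_equal_decompose_branches_from_swc := by
  intro nodes _
  unfold Spec_decompose_branches_from_swc decompose_branches_from_swc decompose_branches_from_swc_alt
  simp only [pvBuild_split]
  cases hr : (pvNodesDict nodes).items.foldl (fun r p => if p.2.2.2.2 == -1 then some p.1 else r) (none : Option Int) with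
  | none => simp
  | some root =>
    simp only []
    rw [pvOuter_eq]
    rfl
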